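-- pv_equiv track=rewrite | github.com/iml1111/algorithm-study | src/nvw/1.py | solution
-- ===== SOURCE A (Python) =====
-- from collections import defaultdict
--
-- def solution(lottery):
--     check_dict = defaultdict(int)
--     num_dict = defaultdict(int)
--
--     for user, result in lottery:
--         if check_dict[user] == 0:
--             num_dict[user] += 1
--
--         if result == 1:
--             check_dict[user] = 1
--
--     user_len = 0
--     num_sum = 0
--     for user, num in num_dict.items():
--         if check_dict[user] == 1:
--             num_sum += num
--             user_len += 1
--
--     if user_len == 0:
--         return 0
--     return num_sum // user_len
-- ===== SOURCE B (Python) =====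
-- def solution(lottery):
--     # Group each user's results in order of first appearance, then score winners once.
--     groups = {}
--     for user, result in lottery:
--         groups.setdefault(user, []).append(result)
--     num_sum = 0
--     user_len = 0
--     for results in groups.values():
--         if 1 in results:
--             num_sum += results.index(1) + 1
--             user_len += 1
--     if user_len == 0:
--         return 0
--     return num_sum // user_len
-- ===== Notes on version B (the rewrite author's own statement) =====
-- stated objective: alternative
-- what changed: B groups each user's results into a dict of lists in one pass and then scores each winning user by index-of-first-win + 1, replacing A's interleaved won-flag/counter dict bookkeeping.
import Mathlib
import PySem

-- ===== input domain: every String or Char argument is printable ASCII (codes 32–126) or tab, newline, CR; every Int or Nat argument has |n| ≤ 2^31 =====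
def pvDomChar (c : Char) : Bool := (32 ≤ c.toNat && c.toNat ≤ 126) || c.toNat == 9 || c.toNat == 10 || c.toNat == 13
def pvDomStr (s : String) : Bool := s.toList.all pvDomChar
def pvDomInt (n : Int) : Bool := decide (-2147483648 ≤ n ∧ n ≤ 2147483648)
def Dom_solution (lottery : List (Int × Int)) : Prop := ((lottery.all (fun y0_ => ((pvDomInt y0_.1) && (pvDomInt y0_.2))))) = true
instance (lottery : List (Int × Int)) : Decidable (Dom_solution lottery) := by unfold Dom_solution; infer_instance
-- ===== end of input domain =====

-- B replaces A's running won-flag/counter bookkeeping with a grouping dict plus an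
-- index-of-first-win scan per user (objective: alternative decomposition, same cost).

-- ===== PORT A =====
-- one step of A's first loop: check_dict/num_dict updates (a defaultdict read stores the default)
def solutionLoopA (cd : PySem.Dict Int Int × PySem.Dict Int Int) (p : Int × Int) :
    PySem.Dict Int Int × PySem.Dict Int Int :=
  let c := cd.1.getD p.1 0
  let check := cd.1.insert p.1 c
  let num := if c == 0 then cd.2.insert p.1 (cd.2.getD p.1 0 + 1) else cd.2
  let check := if p.2 == 1 then check.insert p.1 1 else check
  (check, num)

def solution (lottery : List (Int × Int)) : Int :=
  let st := lottery.foldl solutionLoopA (PySem.Dict.empty, PySem.Dict.empty)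
  -- second loop over num_dict.items()
  let acc := st.2.items.foldl
    (fun (a : Int × Int) kv => if st.1.getD kv.1 0 == 1 then (a.1 + 1, a.2 + kv.2) else a)
    (0, 0)
  if acc.1 == 0 then 0 else PySem.Int.floordiv acc.2 acc.1

-- ===== PORT B =====
def solution_alt (lottery : List (Int × Int)) : Int :=
  let groups := lottery.foldl
    (fun (d : PySem.Dict Int (List Int)) p => d.modify p.1 [] (· ++ [p.2])) PySem.Dict.empty
  let acc := groups.values.foldl
    (fun (a : Int × Int) results =>
      match PySem.List.index? results (1 : Int) with
      | some i => (a.1 + (i : Int) + 1, a.2 + 1)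
      | none => a)
    (0, 0)
  if acc.2 == 0 then 0 else PySem.Int.floordiv acc.1 acc.2

-- ===== PRECONDITION & SPEC =====
def Spec_solution (lottery : List (Int × Int)) (out : Int) : Prop := out = solution_alt lottery
instance (lottery : List (Int × Int)) (out : Int) : Decidable (Spec_solution lottery out) := by unfold Spec_solution; infer_instance

-- ===== CLAIM (what is proved, stated in full; the proofs are below) =====
def Claim_equal_solution : Prop := ∀ (lottery : List (Int × Int)), Dom_solution lottery → Spec_solution lottery (solution lottery)

-- ===== LEMMAS AND PROOFS =====

-- the list of results of user u, in input order
def resOf (l : List (Int × Int)) (u : Int) : List Int :=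
  (l.filter (fun p => p.1 == u)).map (·.2)

-- rows A counts for user u: up to and including the first 1, else all rows
def prefCount (rs : List Int) : Int :=
  match PySem.List.index? rs 1 with
  | some i => (i : Int) + 1
  | none => (rs.length : Int)

lemma resOf_cons (p : Int × Int) (l : List (Int × Int)) (u : Int) :
    resOf (p :: l) u = if p.1 = u then p.2 :: resOf l u else resOf l u := by
  simp only [resOf, List.filter_cons]
  by_cases h : p.1 = u <;> simp [h]

lemma prefCount_cons (r : Int) (rs : List Int) :
    prefCount (r :: rs) = if r = 1 then 1 else prefCount rs + 1 := by
  by_cases h : r = 1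
  · subst h
    rw [if_pos rfl, prefCount, PySem.List.index?_cons_self]
    simp
  · rw [if_neg h, prefCount, PySem.List.index?_cons_of_ne rs h]
    cases hm : PySem.List.index? rs (1 : Int) with
    | some i =>
      simp only [Option.map_some, prefCount, hm]
      push_cast; ring
    | none =>
      simp only [Option.map_none, prefCount, hm, List.length_cons]
      push_cast; ring

lemma prefCount_nil : prefCount [] = 0 := by simp [prefCount, PySem.List.index?_eq_idxOf?]

-- invariant of A's first loop
lemma loopA_state (l : List (Int × Int)) (check num : PySem.Dict Int Int)
    (hc : ∀ u, check.getD u 0 = 0 ∨ check.getD u 0 = 1)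
    (hk : ∀ u, check.getD u 0 = 1 → u ∈ num.keys) :
    (∀ u, (l.foldl solutionLoopA (check, num)).1.getD u 0
        = if check.getD u 0 = 1 ∨ (1:Int) ∈ resOf l u then 1 else 0) ∧
    (∀ u, (l.foldl solutionLoopA (check, num)).2.getD u 0
        = num.getD u 0 + (if check.getD u 0 = 1 then 0 else prefCount (resOf l u))) ∧
    (l.foldl solutionLoopA (check, num)).2.keys = PySem.Set.update num.keys (l.map Prod.fst) := by
  induction l generalizing check num with
  | nil =>
    refine ⟨fun u => ?_, fun u => ?_, by simp [PySem.Set.update_nil]⟩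
    · simp only [List.foldl_nil, resOf, List.filter_nil, List.map_nil, List.not_mem_nil, or_false]
      rcases hc u with h | h <;> simp [h]
    · simp only [List.foldl_nil, resOf, List.filter_nil, List.map_nil, prefCount_nil]
      rcases hc u with h | h <;> simp [h]
  | cons p l ih =>
    have hc01 := hc p.1
    set check₁ := (if p.2 == 1 then (check.insert p.1 (check.getD p.1 0)).insert p.1 1
                   else check.insert p.1 (check.getD p.1 0)) with hch1
    set num₁ := (if check.getD p.1 0 == 0 then num.insert p.1 (num.getD p.1 0 + 1) else num) with hn1
    have hstep : solutionLoopA (check, num) p = (check₁, num₁) := rfl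
    have hcheck₁ : ∀ u, check₁.getD u 0
        = if u = p.1 then (if p.2 = 1 then 1 else check.getD p.1 0) else check.getD u 0 := by
      intro u
      by_cases hu : u = p.1 <;> by_cases hr : p.2 = 1 <;>
        simp [hch1, hu, hr, PySem.Dict.getD_insert, PySem.Dict.insert_insert_self]
    have hnum₁ : ∀ u, num₁.getD u 0
        = if check.getD p.1 0 = 0 ∧ u = p.1 then num.getD p.1 0 + 1 else num.getD u 0 := by
      intro u
      by_cases hcz : check.getD p.1 0 = 0 <;> by_cases hu : u = p.1 <;>
        simp [hn1, hcz, hu, PySem.Dict.getD_insert]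
    have hkeys₁ : num₁.keys = PySem.Set.add num.keys p.1 := by
      by_cases hcz : check.getD p.1 0 = 0
      · by_cases hm : p.1 ∈ num.keys
        · rw [hn1, if_pos (by simp [hcz]), PySem.Dict.keys_insert_of_contains _ _
            (by rwa [PySem.Dict.contains_iff_mem_keys]), PySem.Set.add_of_mem hm]
        · rw [hn1, if_pos (by simp [hcz]), PySem.Dict.keys_insert_of_not_contains _ _
            (by simp [PySem.Dict.contains_eq_decide_mem_keys, hm]), PySem.Set.add_of_not_mem hm]
      · have hc1 : check.getD p.1 0 = 1 := by tauto
        rw [hn1, if_neg (by simp [hc1]), PySem.Set.add_of_mem (hk p.1 hc1)]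
    have hc₁ : ∀ u, check₁.getD u 0 = 0 ∨ check₁.getD u 0 = 1 := by
      intro u
      rw [hcheck₁]
      by_cases hu : u = p.1 <;> by_cases hr : p.2 = 1 <;> simp [hu, hr] <;> first
        | exact hc01 | exact hc u
    have hk₁ : ∀ u, check₁.getD u 0 = 1 → u ∈ num₁.keys := by
      intro u hu1
      rw [hkeys₁, PySem.Set.mem_add]
      rw [hcheck₁] at hu1
      by_cases hu : u = p.1
      · exact Or.inr hu
      · rw [if_neg hu] at hu1
        exact Or.inl (hk u hu1)
    obtain ⟨ih1, ih2, ih3⟩ := ih check₁ num₁ hc₁ hk₁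
    have hfold : (p :: l).foldl solutionLoopA (check, num) = l.foldl solutionLoopA (check₁, num₁) := by
      rw [List.foldl_cons, hstep]
    refine ⟨fun u => ?_, fun u => ?_, ?_⟩
    · rw [hfold, ih1, hcheck₁, resOf_cons]
      by_cases hu : u = p.1
      · subst hu
        by_cases hr : p.2 = 1
        · rcases hc01 with h0 | h0 <;> by_cases hmem : (1:Int) ∈ resOf l p.1 <;>
            simp [hr, h0, hmem]
        · have hr' : (1:Int) ≠ p.2 := fun h => hr h.symm
          rcases hc01 with h0 | h0 <;> by_cases hmem : (1:Int) ∈ resOf l p.1 <;>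
            simp [hr, hr', h0, hmem]
      · have hu' : p.1 ≠ u := fun h => hu h.symm
        simp [hu, hu']
    · rw [hfold, ih2, hcheck₁, hnum₁, resOf_cons]
      by_cases hu : u = p.1
      · subst hu
        rw [if_pos rfl, if_pos rfl, prefCount_cons]
        rcases hc01 with h0 | h0
        · by_cases hr : p.2 = 1
          · simp [h0, hr]
          · simp [h0, hr]; ring
        · by_cases hr : p.2 = 1 <;> simp [h0, hr]
      · simp only [if_neg hu, if_neg (fun h : p.1 = u => hu h.symm),
          if_neg (fun h : check.getD p.1 0 = 0 ∧ u = p.1 => hu h.2)]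
    · rw [hfold, ih3, hkeys₁, List.map_cons, PySem.Set.update_cons]

-- the common second pass: B's fold is the swap of A's fold over the same user list
lemma fold_swap (rs : Int → List Int) (us : List Int) : ∀ (a b : Int),
    us.foldl (fun (x : Int × Int) u =>
        match PySem.List.index? (rs u) 1 with
        | some i => (x.1 + (i : Int) + 1, x.2 + 1)
        | none => x) (b, a)
    = Prod.swap (us.foldl (fun (x : Int × Int) u =>
        if (1:Int) ∈ rs u then (x.1 + 1, x.2 + prefCount (rs u)) else x) (a, b)) := by
  induction us with
  | nil => intro a b; rfl
  | cons u us ih =>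
    intro a b
    simp only [List.foldl_cons]
    cases hm : PySem.List.index? (rs u) 1 with
    | some i =>
      have hmem : (1:Int) ∈ rs u := by
        rw [← PySem.List.index?_isSome_iff (rs u) (1:Int), hm]; rfl
      have hpc : prefCount (rs u) = (i : Int) + 1 := by rw [prefCount, hm]
      simp only [if_pos hmem, hpc]
      rw [ih, add_assoc]
    | none =>
      have hmem : (1:Int) ∉ rs u := (PySem.List.index?_eq_none_iff _ _).1 hm
      simp only [if_neg hmem]
      exact ih a b

-- ===== VERDICT (by name: the statement is the Claim_ definition above) =====
theorem solution_spec : Claim_equal_solution := by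
  intro l _
  unfold Spec_solution
  simp only [solution, solution_alt]
  obtain ⟨h1, h2, h3⟩ := loopA_state l PySem.Dict.empty PySem.Dict.empty
    (fun u => Or.inl (by simp)) (fun u h => by simp at h)
  set st := l.foldl solutionLoopA (PySem.Dict.empty, PySem.Dict.empty) with hst
  have h1' : ∀ u, st.1.getD u 0 = if (1:Int) ∈ resOf l u then 1 else 0 := by
    intro u; rw [h1 u]; simp
  have h2' : ∀ u, st.2.getD u 0 = prefCount (resOf l u) := by
    intro u; rw [h2 u]; simp
  set users := PySem.Set.ofList (l.map Prod.fst) with husers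
  have h3' : st.2.keys = users := by
    rw [h3]; exact PySem.Set.update_nil_left _
  have hnd : st.2.keys.Nodup := h3' ▸ PySem.Set.nodup_ofList _
  have hitems : st.2.items = users.map (fun u => (u, prefCount (resOf l u))) := by
    rw [PySem.Dict.items_eq_map_keys st.2 hnd 0, h3']
    exact List.map_congr_left (fun u _ => by rw [h2' u])
  set groups := l.foldl
    (fun (d : PySem.Dict Int (List Int)) p => d.modify p.1 [] (· ++ [p.2])) PySem.Dict.empty
    with hg
  have hgkeys : groups.keys = users := by
    rw [hg, PySem.Dict.keys_foldl_modify_key l (fun p => p.1) [] (fun _ p => (· ++ [p.2]))]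
    exact PySem.Set.update_nil_left _
  have hgnd : groups.keys.Nodup := hgkeys ▸ PySem.Set.nodup_ofList _
  have hgget : ∀ u, groups.getD u [] = resOf l u := by
    intro u
    rw [hg, PySem.Dict.getD_foldl_modify_append]
    simp [resOf]
  have hvalues : groups.values = users.map (fun u => resOf l u) := by
    rw [PySem.Dict.values_eq_map_keys groups hgnd [], hgkeys]
    exact List.map_congr_left (fun u _ => hgget u)
  rw [hitems, hvalues, List.foldl_map, List.foldl_map]
  have hcond : ∀ (x : Int × Int), ∀ u ∈ users,
      (if st.1.getD ((u, prefCount (resOf l u)) : Int × Int).1 0 == 1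
        then (x.1 + 1, x.2 + ((u, prefCount (resOf l u)) : Int × Int).2) else x)
      = (if (1:Int) ∈ resOf l u then (x.1 + 1, x.2 + prefCount (resOf l u)) else x) := by
    intro x u _
    rw [h1' u]
    by_cases hm : (1:Int) ∈ resOf l u <;> simp [hm]
  rw [PySem.List.foldl_congr_mem users _
      (fun (x : Int × Int) u => if (1:Int) ∈ resOf l u then (x.1 + 1, x.2 + prefCount (resOf l u)) else x)
      ((0:Int), (0:Int)) hcond]
  rw [fold_swap (fun u => resOf l u) users 0 0]
  cases users.foldl
      (fun (x : Int × Int) u => if (1:Int) ∈ resOf l u then (x.1 + 1, x.2 + prefCount (resOf l u)) else x)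
      ((0:Int), (0:Int)) with
  | mk x y => rfl
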